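-- pv_equiv track=rewrite | github.com/k-roy/RECTIFY | rectify/core/chimeric_consensus.py | identify_segments
-- ===== SOURCE A (Python) =====
-- from typing import Dict, List, Optional, Tuple, Set
--
-- def identify_segments(
--     agreement_runs: List[Tuple[int, int, int, int]],
--     read_length: int,
-- ) -> List[Tuple[int, int, str]]:
--     """
--     Identify disagreement segments between agreement runs.
--
--     Between each pair of agreement runs, there's a disagreement segment
--     where aligners diverge. The first and last disagreement segments are
--     labeled as terminal (5' or 3' depending on strand), and interior ones
--     are labeled as 'interior'.
--
--     Also includes the agreement runs themselves as 'agreement' segments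
--     (these don't need scoring — any aligner's CIGAR is fine).
--
--     Args:
--         agreement_runs: From compress_sync_runs()
--         read_length: Total query length
--
--     Returns:
--         List of (q_start, q_end, segment_type) where segment_type is
--         'five_prime', 'three_prime', 'interior', or 'agreement'
--     """
--     if not agreement_runs:
--         # No agreement at all — treat entire read as one segment
--         return [(0, read_length, 'interior')]
--
--     segments = []
--
--     # 5' disagreement (before first agreement)
--     first_agree_start = agreement_runs[0][0]
--     if first_agree_start > 0:
--         segments.append((0, first_agree_start, 'five_prime'))
--
--     # Interleave agreement runs and interior disagreements
--     for i, (aq_start, aq_end, _, _) in enumerate(agreement_runs):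
--         segments.append((aq_start, aq_end, 'agreement'))
--
--         if i < len(agreement_runs) - 1:
--             next_start = agreement_runs[i + 1][0]
--             if aq_end < next_start:
--                 segments.append((aq_end, next_start, 'interior'))
--
--     # 3' disagreement (after last agreement)
--     last_agree_end = agreement_runs[-1][1]
--     if last_agree_end < read_length:
--         segments.append((last_agree_end, read_length, 'three_prime'))
--
--     return segments
-- ===== SOURCE B (Python) =====
-- def identify_segments(agreement_runs, read_length):
--     if not agreement_runs:
--         return [(0, read_length, 'interior')]
--
--     # Stage 1: flatten everything into one boundary-point list.
--     pts = [0]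
--     for s, e, _, _ in agreement_runs:
--         pts.extend((s, e))
--     pts.append(read_length)
--
--     # Stage 2: pairwise scan with parity labeling — odd pairs are agreement
--     # runs, even pairs are gaps (emitted only when non-empty, labeled by
--     # position: first, last or interior).
--     out = []
--     last = len(pts) - 2
--     for j in range(last + 1):
--         a, b = pts[j], pts[j + 1]
--         if j % 2 == 1:
--             out.append((a, b, 'agreement'))
--         elif a < b:
--             out.append((a, b, 'five_prime' if j == 0 else
--                         'three_prime' if j == last else 'interior'))
--     return out
-- ===== Notes on version B (the rewrite author's own statement) =====
-- stated objective: alternative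
-- what changed: Two staged passes over a different representation: first flatten runs into a single boundary-point list [0, s0, e0, ..., sn, en, read_length], then a pairwise scan labels adjacent pairs by parity (odd = agreement, even = gap emitted only when non-empty, positioned five_prime/interior/three_prime), instead of A's single interleaving loop with a pre-loop prefix and lookahead gaps.
import Mathlib
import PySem

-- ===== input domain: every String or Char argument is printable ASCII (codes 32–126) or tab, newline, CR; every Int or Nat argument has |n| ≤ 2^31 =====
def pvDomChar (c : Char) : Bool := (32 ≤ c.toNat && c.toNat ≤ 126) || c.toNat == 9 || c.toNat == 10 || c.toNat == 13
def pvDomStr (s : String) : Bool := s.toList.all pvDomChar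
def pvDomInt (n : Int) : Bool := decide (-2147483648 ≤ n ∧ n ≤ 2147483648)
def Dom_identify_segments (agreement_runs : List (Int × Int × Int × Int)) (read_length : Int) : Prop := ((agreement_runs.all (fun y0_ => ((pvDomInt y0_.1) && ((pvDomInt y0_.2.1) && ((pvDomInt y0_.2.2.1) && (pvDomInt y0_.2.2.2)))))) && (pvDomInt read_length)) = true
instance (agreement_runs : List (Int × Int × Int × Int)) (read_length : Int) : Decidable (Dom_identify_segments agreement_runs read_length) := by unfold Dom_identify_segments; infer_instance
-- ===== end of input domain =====

-- B rebuilds the result from a flattened boundary-point list scanned pairwise with parity labels (alternative decomposition, same cost).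


-- ===== PORT A =====
def aLoop : List (Int × Int × Int × Int) → List (Int × Int × String) → List (Int × Int × String)
  | [], segs => segs
  | (aq_start, aq_end, _, _) :: rest, segs =>
    let segs1 := segs ++ [(aq_start, aq_end, "agreement")]
    match rest with
    | [] => segs1
    | (next_start, _, _, _) :: _ =>
      let segs2 := if aq_end < next_start then segs1 ++ [(aq_end, next_start, "interior")] else segs1
      aLoop rest segs2

def identify_segments (agreement_runs : List (Int × Int × Int × Int)) (read_length : Int) : List (Int × Int × String) :=
  if agreement_runs.isEmpty then [(0, read_length, "interior")]
  else
    let first_agree_start := (agreement_runs.headD (0, 0, 0, 0)).1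
    let segs0 := if first_agree_start > 0 then [((0 : Int), first_agree_start, "five_prime")] else []
    let segs := aLoop agreement_runs segs0
    let last_agree_end := (agreement_runs.getLastD (0, 0, 0, 0)).2.1
    if last_agree_end < read_length then segs ++ [(last_agree_end, read_length, "three_prime")] else segs

-- ===== PORT B =====
-- Stage 1 of Source B: the boundary-point list [0, s0, e0, …] built by the extend loop.
def ptsFold (runs : List (Int × Int × Int × Int)) : List Int :=
  runs.foldl (fun acc p => acc ++ [p.1, p.2.1]) [0]

-- Stage 2 of Source B: the `for j in range(last+1)` pairwise scan; the j-indexed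
-- loop over pts[j], pts[j+1] is transcribed as structural recursion over the
-- same adjacent pairs, carrying the same index j and bound `last`.
def bLoop : List Int → Nat → Nat → List (Int × Int × String)
  | a :: b :: rest, j, last =>
    (if j % 2 == 1 then [(a, b, "agreement")]
     else if a < b then
       [(a, b, if j == 0 then "five_prime" else if j == last then "three_prime" else "interior")]
     else [])
    ++ bLoop (b :: rest) (j + 1) last
  | _, _, _ => []

def identify_segments_alt (agreement_runs : List (Int × Int × Int × Int)) (read_length : Int) : List (Int × Int × String) :=
  if agreement_runs.isEmpty then [(0, read_length, "interior")]
  else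
    let pts := ptsFold agreement_runs ++ [read_length]
    bLoop pts 0 (pts.length - 2)

-- ===== PRECONDITION & SPEC =====
def Spec_identify_segments (agreement_runs : List (Int × Int × Int × Int)) (read_length : Int) (out : List (Int × Int × String)) : Prop := out = identify_segments_alt agreement_runs read_length
instance (agreement_runs : List (Int × Int × Int × Int)) (read_length : Int) (out : List (Int × Int × String)) : Decidable (Spec_identify_segments agreement_runs read_length out) := by unfold Spec_identify_segments; infer_instance

-- ===== CLAIM (what is proved, stated in full; the proofs are below) =====
def Claim_equal_identify_segments : Prop := ∀ (agreement_runs : List (Int × Int × Int × Int)) (read_length : Int), Dom_identify_segments agreement_runs read_length → Spec_identify_segments agreement_runs read_length (identify_segments agreement_runs read_length)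

-- ===== LEMMAS AND PROOFS =====

-- Canonical middle form both sides are reduced to.
def bGo : List (Int × Int × Int × Int) → Int → List (Int × Int × String)
  | [], _ => []
  | (s, e, _, _) :: rest, prev =>
    (if prev < s then [(prev, s, "interior")] else []) ++ (s, e, "agreement") :: bGo rest e

def lastEnd : List (Int × Int × Int × Int) → Int → Int
  | [], prev => prev
  | (_, e, _, _) :: rest, _ => lastEnd rest e

def flatSE (runs : List (Int × Int × Int × Int)) : List Int :=
  runs.flatMap (fun p => [p.1, p.2.1])

theorem ptsFold_eq (runs : List (Int × Int × Int × Int)) :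
    ∀ acc : List Int, runs.foldl (fun acc p => acc ++ [p.1, p.2.1]) acc = acc ++ flatSE runs := by
  induction runs with
  | nil => intro acc; simp [flatSE]
  | cons hd tl ih => intro acc; simp [flatSE, List.foldl_cons, ih, List.flatMap_cons]

theorem flatSE_length (runs : List (Int × Int × Int × Int)) :
    (flatSE runs).length = 2 * runs.length := by
  induction runs with
  | nil => simp [flatSE]
  | cons hd tl ih => simp [flatSE, List.flatMap_cons] at ih ⊢; omega

-- A's lookahead loop equals the look-behind canonical middle.
theorem aLoop_eq_bGo (rest : List (Int × Int × Int × Int)) :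
    ∀ (s e a b : Int) (segs : List (Int × Int × String)),
      aLoop ((s, e, a, b) :: rest) segs = segs ++ (s, e, "agreement") :: bGo rest e := by
  induction rest with
  | nil => intro s e a b segs; simp [aLoop, bGo]
  | cons hd tl ih =>
    intro s e a b segs
    obtain ⟨s', e', a', b'⟩ := hd
    show aLoop ((s', e', a', b') :: tl)
        (if e < s' then (segs ++ [(s, e, "agreement")]) ++ [(e, s', "interior")]
         else segs ++ [(s, e, "agreement")]) = _
    rw [ih]
    by_cases h : e < s' <;> simp [bGo, h]

theorem getLastD_eq_lastEnd (rest : List (Int × Int × Int × Int)) :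
    ∀ (s e a b : Int) (d : Int × Int × Int × Int),
      (List.getLastD ((s, e, a, b) :: rest) d).2.1 = lastEnd rest e := by
  induction rest with
  | nil => intro s e a b d; simp [lastEnd]
  | cons hd tl ih =>
    intro s e a b d
    obtain ⟨s', e', a', b'⟩ := hd
    simpa [lastEnd] using ih s' e' a' b' (s, e, a, b)

-- B's pairwise scan, past the first two pairs, equals the canonical middle plus 3' tail.
theorem bLoop_tail (tl : List (Int × Int × Int × Int)) :
    ∀ (e rl : Int) (j : Nat),
      bLoop (e :: (flatSE tl ++ [rl])) (2 * j + 2) (2 * j + 2 + 2 * tl.length) =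
        bGo tl e ++ (if lastEnd tl e < rl then [(lastEnd tl e, rl, "three_prime")] else []) := by
  induction tl with
  | nil =>
    intro e rl j
    have h0 : (2 * j + 2) % 2 = 0 := by omega
    have h1 : (2 * j + 2) ≠ 0 := by omega
    by_cases h : e < rl <;> simp [flatSE, bLoop, bGo, lastEnd, h, h0]
  | cons hd tl ih =>
    intro e rl j
    obtain ⟨s, e', a, b⟩ := hd
    have hflat : flatSE ((s, e', a, b) :: tl) = s :: e' :: flatSE tl := by
      simp [flatSE]
    rw [hflat]
    have hL : 2 * j + 2 + 2 * ((s, e', a, b) :: tl).length = 2 * j + 2 + 1 + 1 + 2 * tl.length := by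
      simp; omega
    rw [hL]
    have ih' := ih e' rl (j + 1)
    rw [show 2 * (j + 1) + 2 = 2 * j + 2 + 1 + 1 from by omega] at ih'
    simp only [bLoop, List.cons_append]
    have h0 : ((2 * j + 2) % 2 == 1) = false := by
      have : (2 * j + 2) % 2 = 0 := by omega
      simp [this]
    have h1 : ((2 * j + 2 + 1) % 2 == 1) = true := by
      have : (2 * j + 2 + 1) % 2 = 1 := by omega
      simp [this]
    have h2 : ((2 * j + 2) == 0) = false := by simp
    have h3 : ((2 * j + 2) == 2 * j + 2 + 1 + 1 + 2 * tl.length) = false := by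
      simp; omega
    rw [ih']
    by_cases h : e < s <;> simp [h1, h2, h3, bGo, lastEnd, h]

-- ===== VERDICT (by name: the statement is the Claim_ definition above) =====
theorem identify_segments_spec : Claim_equal_identify_segments := by
  intro agreement_runs read_length _
  unfold Spec_identify_segments
  cases agreement_runs with
  | nil => rfl
  | cons hd tl =>
    obtain ⟨s, e, a, b⟩ := hd
    have hpts : ptsFold ((s, e, a, b) :: tl) ++ [read_length] =
        0 :: s :: e :: (flatSE tl ++ [read_length]) := by
      rw [ptsFold, ptsFold_eq]
      simp [flatSE, List.flatMap]
    have hlen : (0 :: s :: e :: (flatSE tl ++ [read_length])).length - 2 = 2 * 0 + 2 + 2 * tl.length := by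
      simp [flatSE_length]; omega
    have hB : identify_segments_alt ((s, e, a, b) :: tl) read_length =
        bLoop (0 :: s :: e :: (flatSE tl ++ [read_length])) 0 (2 * 0 + 2 + 2 * tl.length) := by
      rw [identify_segments_alt]
      simp only [List.isEmpty_cons, Bool.false_eq_true, if_false]
      rw [hpts, hlen]
    rw [hB]
    rw [show bLoop (0 :: s :: e :: (flatSE tl ++ [read_length])) 0 (2 * 0 + 2 + 2 * tl.length) =
        (if (0 : Int) < s then
           [((0 : Int), s, "five_prime")] else []) ++
        ([(s, e, "agreement")] ++
          bLoop (e :: (flatSE tl ++ [read_length])) 2 (2 * 0 + 2 + 2 * tl.length)) from by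
      simp only [bLoop, List.cons_append]
      by_cases h : (0 : Int) < s <;> simp [h]]
    rw [show (2 : Nat) = 2 * 0 + 2 from rfl, bLoop_tail]
    rw [identify_segments]
    simp only [List.isEmpty_cons, Bool.false_eq_true, if_false, List.headD_cons, gt_iff_lt]
    rw [aLoop_eq_bGo, getLastD_eq_lastEnd]
    by_cases h0 : (0 : Int) < s <;> by_cases hL : lastEnd tl e < read_length <;> simp [h0, hL]
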